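-- pv_equiv track=rewrite | github.com/AndyGiorgio/my_practice_repo | python/homework1.py/hw1.py | has123
-- ===== SOURCE A (Python) =====
-- def has123(nums):
--     seq = [1,2,3]
--     for i in range(len(nums) - len(seq) + 1):
--         if nums[i:i+len(seq)] == seq:
--             return True
--     return False
--
--     """
--     Given an list of ints, return True if the sequence of numbers
--     1, 2, 3 appears in the list somewhere. 1,2,3 must occur in order.
--     """
-- ===== SOURCE B (Python) =====
-- def has123(nums):
--     matched = 0
--     for x in nums:
--         if x == (1, 2, 3)[matched]:
--             matched += 1
--             if matched == 3:
--                 return True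
--         else:
--             matched = 1 if x == 1 else 0
--     return False
-- ===== Notes on version B (the rewrite author's own statement) =====
-- stated objective: faster
-- what changed: Replaces the windowed slice-comparison loop with a single state-machine pass that keeps an integer counter of how many leading pattern elements are matched (resetting to 1 on a mismatching 1), avoiding per-index list slicing and comparison.
import Mathlib
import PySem

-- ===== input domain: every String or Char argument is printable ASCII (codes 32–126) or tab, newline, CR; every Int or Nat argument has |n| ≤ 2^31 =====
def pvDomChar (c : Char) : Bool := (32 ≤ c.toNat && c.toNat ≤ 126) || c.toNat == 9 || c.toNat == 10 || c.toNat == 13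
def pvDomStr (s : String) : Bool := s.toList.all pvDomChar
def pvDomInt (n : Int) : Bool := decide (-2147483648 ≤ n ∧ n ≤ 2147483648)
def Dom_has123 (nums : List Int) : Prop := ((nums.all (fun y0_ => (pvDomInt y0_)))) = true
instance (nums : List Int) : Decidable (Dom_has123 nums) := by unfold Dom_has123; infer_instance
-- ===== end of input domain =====

-- B replaces A's windowed slice-comparison loop with a single state-machine pass
-- keeping a counter of how many leading pattern elements are matched (objective: alternative).


-- ===== PORT A =====
-- literal port of A: loop i over range(len(nums) - len(seq) + 1), compare the slice nums[i:i+3] with seq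
def has123 (nums : List Int) : Bool :=
  let seq : List Int := [1, 2, 3]
  (PySem.List.pyRange 0 ((nums.length : Int) - (seq.length : Int) + 1) 1).any
    (fun i => PySem.List.slice nums (some i) (some (i + (seq.length : Int))) == seq)

-- ===== PORT B =====
-- (1,2,3)[matched]
def has123Pat (m : Nat) : Int := if m = 0 then 1 else if m = 1 then 2 else 3

-- the for-loop of B: `matched` is the first argument, early return on matched == 3
def has123Go (m : Nat) : List Int → Bool
  | [] => false
  | x :: t =>
      if x = has123Pat m then
        if m = 2 then true else has123Go (m + 1) t
      else
        has123Go (if x = 1 then 1 else 0) t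

def has123_alt (nums : List Int) : Bool := has123Go 0 nums

-- ===== PRECONDITION & SPEC =====
def Spec_has123 (nums : List Int) (out : Bool) : Prop := out = has123_alt nums
instance (nums : List Int) (out : Bool) : Decidable (Spec_has123 nums out) := by unfold Spec_has123; infer_instance

-- ===== CLAIM (what is proved, stated in full; the proofs are below) =====
def Claim_equal_has123 : Prop := ∀ (nums : List Int), Dom_has123 nums → Spec_has123 nums (has123 nums)

-- ===== LEMMAS AND PROOFS =====

-- common reference form: does [1,2,3] occur as a consecutive sublist?
def has123Sub : List Int → Bool
  | [] => false
  | x :: t => (decide (x = 1) && decide (t.take 2 = [2, 3])) || has123Sub t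

-- A's loop in terms of List.range and drop/take
theorem has123_eq_range (l : List Int) :
    has123 l = (List.range (l.length - 2)).any
      (fun k => decide ((l.drop k).take 3 = [1, 2, 3])) := by
  show (PySem.List.pyRange 0 ((l.length : Int) - (([1,2,3] : List Int).length : Int) + 1) 1).any
      (fun i => PySem.List.slice l (some i) (some (i + (([1,2,3] : List Int).length : Int))) == [1,2,3]) = _
  rw [PySem.List.pyRange_one]
  have hb : (((l.length : Int) - (([1,2,3] : List Int).length : Int) + 1) - 0).toNat = l.length - 2 := by
    simp; omega
  rw [hb, List.any_map]
  congr 1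
  funext k
  simp only [Function.comp_apply]
  have h0 : (0 : Int) + (k : Int) = ((k : Nat) : Int) := by ring
  rw [h0]
  have h3 : ((k : Nat) : Int) + (([1, 2, 3] : List Int).length : Int)
      = ((k : Nat) : Int) + ((3 : Nat) : Int) := by simp
  rw [h3, PySem.List.slice_natCast_add]
  rw [Bool.eq_iff_iff, beq_iff_eq, decide_eq_true_eq]

theorem range_any_eq_sub (l : List Int) :
    ∀ n, l.length ≤ n + 2 →
      (List.range n).any (fun k => decide ((l.drop k).take 3 = [1, 2, 3])) = has123Sub l := by
  induction l with
  | nil => intro n _; simp [has123Sub]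
  | cons x t ih =>
      intro n hn
      cases n with
      | zero =>
          have ht : t.length ≤ 1 := by simpa using hn
          have h2 : ¬ (t.take 2 = [2, 3]) := by
            intro h
            have := congrArg List.length h
            simp at this
            omega
          have h0 := ih 0 (by omega)
          simp at h0
          simp [has123Sub, h2, ← h0]
      | succ m =>
          rw [List.range_succ_eq_map]
          have hih := ih m (by simp at hn; omega)
          simp only [List.any_cons, List.any_map]
          have : ((x :: t).drop 0).take 3 = x :: t.take 2 := by simp [List.take_succ_cons]
          rw [this]
          have hfun : ((fun k => decide ((List.drop k (x :: t)).take 3 = ([1,2,3] : List Int))) ∘ Nat.succ)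
              = (fun k => decide ((t.drop k).take 3 = ([1,2,3] : List Int))) := by
            funext k; simp
          rw [hfun, hih]
          have hhead : decide (x :: t.take 2 = [1, 2, 3])
              = (decide (x = 1) && decide (t.take 2 = [2, 3])) := by
            by_cases hx : x = 1 <;> by_cases ht2 : t.take 2 = [2, 3] <;> simp [hx, ht2]
          rw [hhead]; rfl

theorem go2_eq (t : List Int) :
    has123Go 2 t = (decide (t.take 1 = [3]) || has123Go 0 t) := by
  cases t with
  | nil => simp [has123Go]
  | cons x t' =>
      by_cases hx : x = 3
      · subst hx; simp [has123Go, has123Pat, List.take_succ_cons]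
      · by_cases h1 : x = 1
        · subst h1; simp [has123Go, has123Pat]
        · simp [has123Go, has123Pat, hx, h1, List.take_succ_cons]

theorem go1_eq (t : List Int) :
    has123Go 1 t = (decide (t.take 2 = [2, 3]) || has123Go 0 t) := by
  cases t with
  | nil => simp [has123Go]
  | cons x t' =>
      by_cases hx : x = 2
      · subst hx
        have : has123Go 1 (2 :: t') = has123Go 2 t' := by simp [has123Go, has123Pat]
        rw [this, go2_eq]
        have : has123Go 0 (2 :: t') = has123Go 0 t' := by simp [has123Go, has123Pat]
        rw [this]
        have : decide ((2 :: t').take 2 = [2, 3]) = decide (t'.take 1 = [3]) := by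
          simp [List.take_succ_cons]
        rw [this]
      · by_cases h1 : x = 1
        · subst h1; simp [has123Go, has123Pat, List.take_succ_cons]
        · simp [has123Go, has123Pat, hx, h1, List.take_succ_cons]

theorem go0_eq (t : List Int) : has123Go 0 t = has123Sub t := by
  induction t with
  | nil => simp [has123Go, has123Sub]
  | cons x t' ih =>
      by_cases h1 : x = 1
      · subst h1
        have : has123Go 0 (1 :: t') = has123Go 1 t' := by simp [has123Go, has123Pat]
        rw [this, go1_eq, ih]
        simp [has123Sub]
      · have : has123Go 0 (x :: t') = has123Go 0 t' := by simp [has123Go, has123Pat, h1]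
        rw [this, ih]
        simp [has123Sub, h1]

-- ===== VERDICT (by name: the statement is the Claim_ definition above) =====
theorem has123_spec : Claim_equal_has123 := by
  intro nums _
  unfold Spec_has123 has123_alt
  rw [has123_eq_range, range_any_eq_sub nums (nums.length - 2) (by omega), go0_eq]
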